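-- pv_equiv track=rewrite | github.com/JoeB022/largesquare-codility | large_square.py | solution
-- ===== SOURCE A (Python) =====
-- def solution(A):
--     max_square = 0
--     count = 0
--
--     for i in range(len(A)):
--         if i == 0 or A[i] == A[i - 1]:
--             count += 1
--         else:
--             count = 1
--
--         current_square_size = min(A[i], count)
--         max_square = max(max_square, current_square_size)
--     return max_square
-- ===== SOURCE B (Python) =====
-- def _feasible(A, k):
--     # Is there a window of k consecutive equal elements whose value is >= k?
--     run = 0
--     prev = None
--     for x in A:
--         run = run + 1 if x == prev else 1
--         if x >= k and run >= k:
--             return True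
--         prev = x
--     return False
--
--
-- def solution(A):
--     # Binary search the answer: the feasibility predicate is monotone in k.
--     lo, hi = 0, len(A)
--     while lo < hi:
--         mid = (lo + hi + 1) // 2
--         if _feasible(A, mid):
--             lo = mid
--         else:
--             hi = mid - 1
--     return lo
-- ===== Notes on version B (the rewrite author's own statement) =====
-- stated objective: alternative
-- what changed: Replaces A's single running-max pass (max over i of min(A[i], run length)) with a binary search over the answer k in [0, len(A)] driven by a monotone feasibility check 'is there a window of k consecutive equal elements with value >= k'.
import Mathlib
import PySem

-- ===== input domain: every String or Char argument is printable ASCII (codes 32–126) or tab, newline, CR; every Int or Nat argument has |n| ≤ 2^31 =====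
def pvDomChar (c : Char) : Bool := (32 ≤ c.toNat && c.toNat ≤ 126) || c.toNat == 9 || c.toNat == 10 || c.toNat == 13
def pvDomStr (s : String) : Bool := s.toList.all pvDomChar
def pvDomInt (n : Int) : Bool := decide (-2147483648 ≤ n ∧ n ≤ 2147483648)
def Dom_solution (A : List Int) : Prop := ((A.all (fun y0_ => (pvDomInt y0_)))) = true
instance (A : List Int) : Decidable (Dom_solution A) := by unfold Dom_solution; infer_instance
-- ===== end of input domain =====

-- B replaces A's single running-max pass with a binary search on the answer over a monotone feasibility predicate (alternative algorithm, not faster).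


-- ===== PORT A =====
-- A: for i in range(len(A)): index fold with state (max_square, count)
def solution (A : List Int) : Int :=
  ((PySem.List.pyRange 0 (A.length) 1).foldl
    (fun (st : Int × Int) i =>
      let count : Int :=
        if i = 0 ∨ PySem.List.pyGetD A i 0 = PySem.List.pyGetD A (i - 1) 0 then st.2 + 1 else 1
      (max st.1 (min (PySem.List.pyGetD A i 0) count), count))
    (0, 0)).1

-- ===== PORT B =====
-- B's _feasible: for x in A with (run, prev) state, early return True
def feasibleGo (k : Int) : List Int → Option Int → Int → Bool
  | [], _, _ => false
  | x :: xs, prev, run =>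
      let run' : Int := if some x = prev then run + 1 else 1
      if k ≤ x ∧ k ≤ run' then true else feasibleGo k xs (some x) run'

def solutionFeasible (A : List Int) (k : Int) : Bool := feasibleGo k A none 0

-- B's while loop: binary search on [lo, hi].  Python's '//' is ported as Int.ediv '/',
-- which agrees with floor division here since lo+hi+1 ≥ 0 on every reachable state
-- (lo starts at 0, mid > lo, hi starts at len(A) ≥ 0 and mid-1 ≥ lo).
def solutionBs (A : List Int) (lo hi : Int) : Int :=
  if _h : lo < hi then
    if solutionFeasible A ((lo + hi + 1) / 2) then solutionBs A ((lo + hi + 1) / 2) hi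
    else solutionBs A lo ((lo + hi + 1) / 2 - 1)
  else lo
termination_by (hi - lo).toNat
decreasing_by all_goals omega

def solution_alt (A : List Int) : Int := solutionBs A 0 (A.length : Int)

-- ===== PRECONDITION & SPEC =====
def Spec_solution (A : List Int) (out : Int) : Prop := out = solution_alt A
instance (A : List Int) (out : Int) : Decidable (Spec_solution A out) := by unfold Spec_solution; infer_instance

-- ===== CLAIM (what is proved, stated in full; the proofs are below) =====
def Claim_equal_solution : Prop := ∀ (A : List Int), Dom_solution A → Spec_solution A (solution A)

-- ===== LEMMAS AND PROOFS =====

-- proof-side recursive characterisation of A's index fold: remaining list, previous element, count, best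
def fA : List Int → Option Int → Int → Int → Int
  | [], _, _, m => m
  | x :: xs, p, c, m =>
      let c' : Int := if some x = p then c + 1 else 1
      fA xs (some x) c' (max m (min x c'))

lemma foldA_eq_fA (A : List Int) : ∀ (n k : Nat) (c m : Int), n = A.length - k → k ≤ A.length →
    (k = 0 → c = 0) →
    ((PySem.List.pyRange (k : Int) (A.length) 1).foldl
      (fun (st : Int × Int) i =>
        let count : Int :=
          if i = 0 ∨ PySem.List.pyGetD A i 0 = PySem.List.pyGetD A (i - 1) 0 then st.2 + 1 else 1
        (max st.1 (min (PySem.List.pyGetD A i 0) count), count))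
      (m, c)).1
    = fA (A.drop k) (if k = 0 then none else some (A.getD (k - 1) 0)) c m := by
  intro n
  induction n with
  | zero =>
      intro k c m hn hk _
      have hk' : k = A.length := by omega
      subst hk'
      rw [PySem.List.pyRange_one_eq_nil (by exact_mod_cast le_refl _)]
      simp [fA, List.drop_length]
  | succ n ih =>
      intro k c m hn hk hc0
      have hklt : k < A.length := by omega
      rw [PySem.List.pyRange_one_cons (by exact_mod_cast hklt)]
      simp only [List.foldl_cons]
      have hx : PySem.List.pyGetD A (k : Int) 0 = A.getD k 0 := PySem.List.pyGetD_natCast A k 0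
      have hdrop : A.drop k = A.getD k 0 :: A.drop (k + 1) := by
        rw [List.getD_eq_getElem A 0 hklt]
        exact (List.drop_eq_getElem_cons hklt)
      set c' : Int :=
        (if (k : Int) = 0 ∨ PySem.List.pyGetD A (k : Int) 0 = PySem.List.pyGetD A ((k : Int) - 1) 0
          then c + 1 else 1) with hc'
      have hstep : ((k : Int) + 1) = ((k + 1 : Nat) : Int) := by push_cast; ring
      rw [hstep]
      rw [ih (k + 1) c' (max m (min (PySem.List.pyGetD A (k : Int) 0) c')) (by omega) (by omega)
        (by omega)]
      rw [hdrop]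
      have hc'' : c' = (if some (A.getD k 0) = (if k = 0 then none else some (A.getD (k - 1) 0))
          then c + 1 else 1) := by
        rcases Nat.eq_zero_or_pos k with h0 | hpos
        · subst h0
          simp [hc', hc0 rfl]
        · have hk0 : ((k : Int) = 0) = False := by simp; omega
          have hprev : ((k : Int) - 1) = ((k - 1 : Nat) : Int) := by push_cast [hpos]; ring
          rw [hc', hprev, hx, PySem.List.pyGetD_natCast A (k - 1) 0]
          have : (k = 0) = False := by simp; omega
          simp [this]
      rw [fA]
      simp only [← hc'', hx]
      norm_num

-- the per-position scores min(A[i], count) that A maximises over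
def mins : List Int → Option Int → Int → List Int
  | [], _, _ => []
  | x :: xs, p, c =>
      let c' : Int := if some x = p then c + 1 else 1
      min x c' :: mins xs (some x) c'

lemma fA_eq_foldl_mins : ∀ (xs : List Int) (p : Option Int) (c m : Int),
    fA xs p c m = (mins xs p c).foldl max m := by
  intro xs
  induction xs with
  | nil => intro p c m; rfl
  | cons x t ih => intro p c m; rw [fA, mins]; simp only [List.foldl_cons]; exact ih _ _ _

lemma le_foldl_max : ∀ (l : List Int) (a k : Int),
    k ≤ l.foldl max a ↔ k ≤ a ∨ ∃ v ∈ l, k ≤ v := by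
  intro l
  induction l with
  | nil => intro a k; simp
  | cons x t ih =>
      intro a k
      simp only [List.foldl_cons, ih, List.mem_cons]
      constructor
      · rintro (h | ⟨v, hv, hk⟩)
        · rcases le_max_iff.mp h with h | h
          · exact Or.inl h
          · exact Or.inr ⟨x, Or.inl rfl, h⟩
        · exact Or.inr ⟨v, Or.inr hv, hk⟩
      · rintro (h | ⟨v, hv | hv, hk⟩)
        · exact Or.inl (le_max_of_le_left h)
        · exact Or.inl (le_max_of_le_right (hv ▸ hk))
        · exact Or.inr ⟨v, hv, hk⟩

lemma foldl_max_le : ∀ (l : List Int) (a b : Int), a ≤ b → (∀ v ∈ l, v ≤ b) →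
    l.foldl max a ≤ b := by
  intro l
  induction l with
  | nil => intro a b h _; simpa
  | cons x t ih =>
      intro a b h hall
      simp only [List.foldl_cons]
      exact ih _ _ (max_le h (hall x (List.mem_cons_self))) (fun v hv => hall v (List.mem_cons_of_mem _ hv))

lemma feasibleGo_iff : ∀ (xs : List Int) (p : Option Int) (c k : Int),
    feasibleGo k xs p c = true ↔ ∃ v ∈ mins xs p c, k ≤ v := by
  intro xs
  induction xs with
  | nil => intro p c k; simp [feasibleGo, mins]
  | cons x t ih =>
      intro p c k
      rw [feasibleGo, mins]
      by_cases h : k ≤ x ∧ k ≤ (if some x = p then c + 1 else 1)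
      · simp only [if_pos h, List.mem_cons]
        constructor
        · intro _; exact ⟨min x (if some x = p then c + 1 else 1), Or.inl rfl, le_min h.1 h.2⟩
        · intro _; trivial
      · simp only [if_neg h, ih, List.mem_cons]
        constructor
        · rintro ⟨v, hv, hk⟩; exact ⟨v, Or.inr hv, hk⟩
        · rintro ⟨v, hv | hv, hk⟩
          · exfalso; exact h ⟨le_trans hk (hv ▸ min_le_left _ _), le_trans hk (hv ▸ min_le_right _ _)⟩
          · exact ⟨v, hv, hk⟩

lemma mins_le_len : ∀ (xs : List Int) (p : Option Int) (c : Int), 0 ≤ c →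
    ∀ v ∈ mins xs p c, v ≤ c + (xs.length : Int) := by
  intro xs
  induction xs with
  | nil => intro p c _ v hv; simp [mins] at hv
  | cons x t ih =>
      intro p c hc v hv
      rw [mins, List.mem_cons] at hv
      have h1 : (if some x = p then c + 1 else 1) ≤ c + 1 ∧
          (1 : Int) ≤ (if some x = p then c + 1 else 1) := by split_ifs <;> omega
      rcases hv with rfl | hv
      · have h2 := min_le_right x (if some x = p then c + 1 else 1)
        simp only [List.length_cons]
        push_cast
        omega
      · have h3 := ih (some x) (if some x = p then c + 1 else 1) (by omega) v hv
        simp only [List.length_cons]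
        push_cast
        push_cast at h3
        omega

-- binary-search correctness relative to the maximum m it brackets
lemma bs_eq (A : List Int) (m : Int)
    (hiff : ∀ k : Int, 0 < k → (solutionFeasible A k = true ↔ k ≤ m)) :
    ∀ (fuel : Nat) (lo hi : Int), (hi - lo).toNat ≤ fuel → 0 ≤ lo → lo ≤ hi →
      solutionBs A lo hi = max lo (min m hi) := by
  intro fuel
  induction fuel with
  | zero =>
      intro lo hi hf h0 hle
      have : lo = hi := by omega
      subst this
      rw [solutionBs]
      simp
  | succ n ih =>
      intro lo hi hf h0 hle
      rw [solutionBs]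
      by_cases h : lo < hi
      · simp only [dif_pos h]
        have hmid1 : lo < (lo + hi + 1) / 2 := by omega
        have hmid2 : (lo + hi + 1) / 2 ≤ hi := by omega
        by_cases hp : solutionFeasible A ((lo + hi + 1) / 2) = true
        · rw [if_pos hp]
          have hm : (lo + hi + 1) / 2 ≤ m := (hiff _ (by omega)).mp hp
          rw [ih _ _ (by omega) (by omega) hmid2]
          omega
        · rw [if_neg hp]
          have hm : ¬ ((lo + hi + 1) / 2 ≤ m) := fun hc => hp ((hiff _ (by omega)).mpr hc)
          rw [ih _ _ (by omega) h0 (by omega)]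
          omega
      · simp only [dif_neg h]
        omega

-- ===== VERDICT (by name: the statement is the Claim_ definition above) =====
theorem solution_spec : Claim_equal_solution := by
  intro A _
  unfold Spec_solution solution solution_alt
  have h := foldA_eq_fA A (A.length - 0) 0 0 0 rfl (by omega) (fun _ => rfl)
  simp only [Nat.cast_zero, List.drop_zero, if_true] at h
  rw [h, fA_eq_foldl_mins]
  set m := (mins A none 0).foldl max 0 with hm
  have hm0 : 0 ≤ m := (le_foldl_max _ _ _).mpr (Or.inl le_rfl)
  have hmn : m ≤ (A.length : Int) := by
    refine foldl_max_le _ _ _ (by positivity) ?_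
    intro v hv
    have := mins_le_len A none 0 le_rfl v hv
    omega
  have hiff : ∀ k : Int, 0 < k → (solutionFeasible A k = true ↔ k ≤ m) := by
    intro k hk
    unfold solutionFeasible
    rw [feasibleGo_iff, hm, le_foldl_max]
    constructor
    · exact fun hv => Or.inr hv
    · rintro (h0 | hv)
      · omega
      · exact hv
  have hb := bs_eq A m hiff (A.length + 1) 0 (A.length : Int) (by omega) le_rfl (by positivity)
  rw [hb]
  omega
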